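-- pv_equiv track=rewrite | github.com/GSA-TTS/FAC | backend/support/cog_over.py | prune_dict_to_max_values
-- ===== SOURCE A (Python) =====
-- def prune_dict_to_max_values(data: dict):
--     """
--     prune_dict_to_max_values({"a": 5, "b": 10, "c": 10}) => {"b": 10, "c": 10}
--     """
--     if len(data) == 0:
--         return data
--
--     pruned_dict = {}
--     max_value = max(data.values())
--     for key, value in data.items():
--         if value == max_value:
--             pruned_dict[key] = value
--     return pruned_dict
-- ===== SOURCE B (Python) =====
-- def prune_dict_to_max_values(data: dict):
--     """Single pass: track the running maximum and rebuild the winners dict on each new maximum."""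
--     if len(data) == 0:
--         return data
--     best = None
--     result = {}
--     for key, value in data.items():
--         if best is None or value > best:
--             best = value
--             result = {key: value}
--         elif value == best:
--             result[key] = value
--     return result
-- ===== Notes on version B (the rewrite author's own statement) =====
-- stated objective: alternative
-- what changed: Replaces A's separate max() scan plus a second filtering loop with one pass that tracks the running maximum and resets/extends the winners dict as it goes.
import Mathlib
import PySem

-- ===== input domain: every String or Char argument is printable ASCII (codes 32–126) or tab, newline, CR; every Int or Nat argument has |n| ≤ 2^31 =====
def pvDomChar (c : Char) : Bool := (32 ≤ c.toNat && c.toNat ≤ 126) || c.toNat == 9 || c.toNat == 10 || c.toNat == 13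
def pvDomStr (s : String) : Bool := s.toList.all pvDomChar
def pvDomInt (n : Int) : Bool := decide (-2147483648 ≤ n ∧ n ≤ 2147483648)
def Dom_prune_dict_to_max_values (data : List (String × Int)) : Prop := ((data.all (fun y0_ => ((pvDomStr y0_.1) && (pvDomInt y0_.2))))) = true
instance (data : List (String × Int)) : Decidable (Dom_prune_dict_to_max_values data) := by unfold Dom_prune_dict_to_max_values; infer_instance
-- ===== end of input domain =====

-- B replaces A's two passes (max() scan, then a filter loop) with one pass tracking the
-- running maximum and its winners; objective: alternative (same O(n) cost).

-- ===== PORT A =====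
-- if len(data)==0: return data; max_value = max(data.values());
-- for key,value in data.items(): if value == max_value: pruned_dict[key] = value
def prune_dict_to_max_values (data : List (String × Int)) : List (String × Int) :=
  if data.length = 0 then data
  else
    match PySem.List.max? (data.map (·.2)) (fun v => v) with
    | none => data  -- unreachable: data is nonempty
    | some mx =>
      (data.foldl (fun (d : PySem.Dict String Int) kv =>
          if kv.2 = mx then d.insert kv.1 kv.2 else d) PySem.Dict.empty).items

-- ===== PORT B =====
-- single pass: best = None; on value > best reset result to {key: value}; on value == best add.
def prune_dict_to_max_values_alt (data : List (String × Int)) : List (String × Int) :=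
  if data.length = 0 then data
  else
    (data.foldl (fun (st : Option Int × PySem.Dict String Int) kv =>
        match st.1 with
        | none => (some kv.2, (PySem.Dict.empty : PySem.Dict String Int).insert kv.1 kv.2)
        | some b =>
          if kv.2 > b then (some kv.2, (PySem.Dict.empty : PySem.Dict String Int).insert kv.1 kv.2)
          else if kv.2 = b then (st.1, st.2.insert kv.1 kv.2)
          else st)
      (none, PySem.Dict.empty)).2.items

-- ===== PRECONDITION & SPEC =====
def Spec_prune_dict_to_max_values (data : List (String × Int)) (out : List (String × Int)) : Prop := out = prune_dict_to_max_values_alt data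
instance (data : List (String × Int)) (out : List (String × Int)) : Decidable (Spec_prune_dict_to_max_values data out) := by unfold Spec_prune_dict_to_max_values; infer_instance

-- ===== CLAIM (what is proved, stated in full; the proofs are below) =====
def Claim_equal_prune_dict_to_max_values : Prop := ∀ (data : List (String × Int)), Dom_prune_dict_to_max_values data → Spec_prune_dict_to_max_values data (prune_dict_to_max_values data)

-- ===== LEMMAS AND PROOFS =====

-- A's filtering loop, as a function of the maximum m and the accumulator d
def pvAfold (m : Int) (d : PySem.Dict String Int) (l : List (String × Int)) : PySem.Dict String Int :=
  l.foldl (fun d kv => if kv.2 = m then d.insert kv.1 kv.2 else d) d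

-- B's one-pass loop body
def pvBstep (st : Option Int × PySem.Dict String Int) (kv : String × Int) :
    Option Int × PySem.Dict String Int :=
  match st.1 with
  | none => (some kv.2, (PySem.Dict.empty : PySem.Dict String Int).insert kv.1 kv.2)
  | some b =>
    if kv.2 > b then (some kv.2, (PySem.Dict.empty : PySem.Dict String Int).insert kv.1 kv.2)
    else if kv.2 = b then (st.1, st.2.insert kv.1 kv.2)
    else st

lemma pvAfold_cons (m : Int) (d : PySem.Dict String Int) (kv : String × Int)
    (t : List (String × Int)) :
    pvAfold m d (kv :: t) = pvAfold m (if kv.2 = m then d.insert kv.1 kv.2 else d) t := by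
  simp [pvAfold, List.foldl_cons]

lemma le_foldl_max_int (b : Int) (l : List Int) : b ≤ l.foldl max b := by
  induction l generalizing b with
  | nil => simp
  | cons x t ih => exact le_trans (le_max_left b x) (ih (max b x))

-- B's loop from state (some b, d) computes (some m, A's filter loop), where m is the
-- running maximum of b and the remaining values; the accumulator survives iff b is already m.
lemma pvB_invariant (l : List (String × Int)) (b : Int) (d : PySem.Dict String Int) :
    l.foldl pvBstep (some b, d)
      = (some ((l.map (·.2)).foldl max b),
         pvAfold ((l.map (·.2)).foldl max b)
           (if b = (l.map (·.2)).foldl max b then d else PySem.Dict.empty) l) := by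
  induction l generalizing b d with
  | nil => simp [pvAfold]
  | cons kv t ih =>
    have hm : ((kv :: t).map (·.2)).foldl max b = (t.map (·.2)).foldl max (max b kv.2) := by
      simp
    rcases lt_trichotomy kv.2 b with hlt | heq | hgt
    · -- value < best: state unchanged
      have hstep : pvBstep (some b, d) kv = (some b, d) := by
        simp [pvBstep, not_lt.mpr (le_of_lt hlt), ne_of_lt hlt]
      have hmax : max b kv.2 = b := max_eq_left (le_of_lt hlt)
      rw [List.foldl_cons, hstep, ih, hm, hmax, pvAfold_cons]
      have hne : kv.2 ≠ (t.map (·.2)).foldl max b :=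
        ne_of_lt (lt_of_lt_of_le hlt (le_foldl_max_int b _))
      simp [hne]
    · -- value == best: insert into result
      have hstep : pvBstep (some b, d) kv = (some b, d.insert kv.1 kv.2) := by
        simp [pvBstep, heq]
      have hmax : max b kv.2 = b := by omega
      rw [List.foldl_cons, hstep, ih, hm, hmax, pvAfold_cons]
      by_cases hb : b = (t.map (·.2)).foldl max b
      · have hk : kv.2 = (t.map (·.2)).foldl max b := heq.trans hb
        simp only [if_pos hb, if_pos hk]
      · have hk : kv.2 ≠ (t.map (·.2)).foldl max b := fun h => hb (heq.symm.trans h)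
        simp only [if_neg hb, if_neg hk]
    · -- value > best: reset result
      have hstep : pvBstep (some b, d) kv
          = (some kv.2, (PySem.Dict.empty : PySem.Dict String Int).insert kv.1 kv.2) := by
        simp [pvBstep, hgt]
      have hmax : max b kv.2 = kv.2 := max_eq_right (le_of_lt hgt)
      rw [List.foldl_cons, hstep, ih, hm, hmax, pvAfold_cons]
      have hble : b ≠ (t.map (·.2)).foldl max kv.2 := by
        have := le_foldl_max_int kv.2 (t.map (·.2))
        omega
      simp [hble]

-- ===== VERDICT (by name: the statement is the Claim_ definition above) =====
theorem prune_dict_to_max_values_spec : Claim_equal_prune_dict_to_max_values := by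
  intro data _
  show prune_dict_to_max_values data = prune_dict_to_max_values_alt data
  cases data with
  | nil => rfl
  | cons kv t =>
    unfold prune_dict_to_max_values prune_dict_to_max_values_alt
    simp only [List.length_cons, Nat.succ_ne_zero, if_false, List.map_cons,
      PySem.List.max?_id_cons]
    have hB : (kv :: t).foldl pvBstep (none, PySem.Dict.empty)
        = (some ((t.map (·.2)).foldl max kv.2),
           pvAfold ((t.map (·.2)).foldl max kv.2)
             (if kv.2 = (t.map (·.2)).foldl max kv.2
              then (PySem.Dict.empty : PySem.Dict String Int).insert kv.1 kv.2
              else PySem.Dict.empty) t) := by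
      rw [List.foldl_cons]
      show t.foldl pvBstep (pvBstep (none, PySem.Dict.empty) kv) = _
      rw [show pvBstep (none, PySem.Dict.empty) kv
            = (some kv.2, (PySem.Dict.empty : PySem.Dict String Int).insert kv.1 kv.2) from rfl]
      rw [pvB_invariant]
    show (List.foldl _ PySem.Dict.empty (kv :: t)).items
        = ((kv :: t).foldl pvBstep (none, PySem.Dict.empty)).2.items
    rw [hB]
    simp only [pvAfold, List.foldl_cons]
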